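-- pv_equiv track=rewrite | github.com/ankurs287/CP-Problems-Solutions | hw3.py | compare_distr
-- ===== SOURCE A (Python) =====
-- def compare_distr(L1,L2,bi) :
--     M=max(L1)
--     m=min(L1)
--     n=bi
--
--     s2=[]
--     L=[]
--     i=0
--     while m+n*i<M :
--         i=i+1
--         l=i
--
--     if m+n*l==M :
--         l=l+1
--
--     s1=[]
--     s1=[]*(l+1)
--     for i in range(l):
--         s1.append([])
--         for j in range(len(L1)) :
--             if m+n*i<=L1[j]<m+n*(i+1) :
--                 s1[i].append(L1[j])
--
--
--
--     for i in range(len(s1)) :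
--
--         c=len(s1[i])
--         s2.append(c)
--
--
--     M=max(L2)
--     m=min(L2)
--     n=bi
--
--     s3=[]
--     L=[]
--     i=0
--     while m+n*i<M :
--         i=i+1
--         l=i
--
--     if m+n*l==M :
--         l=l+1
--
--     s1=[]
--     s1=[]*(l+1)
--     for i in range(l):
--         s1.append([])
--         for j in range(len(L2)) :
--             if m+n*i<=L2[j]<m+n*(i+1) :
--                 s1[i].append(L1[j])
--
--
--
--     for i in range(len(s1)) :
--
--         c=len(s1[i])
--         s3.append(c)
--
--     if s2==s3:
--         return True
--     else:
--         return False
-- ===== SOURCE B (Python) =====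
-- def compare_distr(L1, L2, bi):
--     def counts(L):
--         m = min(L)
--         c = [0] * ((max(L) - m) // bi + 1)
--         for x in L:
--             c[(x - m) // bi] += 1
--         return c
--     return counts(L1) == counts(L2)
-- ===== Notes on version B (the rewrite author's own statement) =====
-- stated objective: faster
-- what changed: Instead of building, for each of the ~(max-min)/bi bins, an explicit row list by rescanning the whole input list, B makes one pass per list computing each element's bin index (x-min)//bi and incrementing a counts array, then compares the two counts lists.
import Mathlib
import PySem

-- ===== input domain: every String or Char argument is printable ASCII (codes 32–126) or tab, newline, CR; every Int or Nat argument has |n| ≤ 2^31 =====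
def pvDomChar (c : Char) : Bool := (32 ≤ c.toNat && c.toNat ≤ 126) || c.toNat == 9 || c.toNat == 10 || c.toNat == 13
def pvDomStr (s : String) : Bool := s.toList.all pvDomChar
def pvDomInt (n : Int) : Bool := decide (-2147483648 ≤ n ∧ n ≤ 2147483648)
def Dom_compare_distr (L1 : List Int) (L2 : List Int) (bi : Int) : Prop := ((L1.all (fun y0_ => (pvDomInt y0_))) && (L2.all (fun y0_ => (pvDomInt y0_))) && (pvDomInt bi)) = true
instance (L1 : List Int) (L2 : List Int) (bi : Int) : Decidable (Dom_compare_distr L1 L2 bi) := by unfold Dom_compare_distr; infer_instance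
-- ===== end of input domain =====

-- B replaces A's per-bin rescan of the whole list by a single counting pass per
-- list over bin indices (x-min)//bi; equivalence of RETURN values is proved on
-- Pre_ (exactly the inputs where A returns normally).

-- ===== PORT A =====
-- the 'while m+n*i<M : i=i+1 ; l=i' loop; the '1 ≤ n' conjunct is a pure totality
-- guard (for n ≤ 0 and m < M the Python loop diverges; Pre_ excludes that region)
def compareWhile (m M n i : Int) : Int :=
  if m + n * i < M ∧ 1 ≤ n then compareWhile m M n (i + 1) else i
  termination_by (M - (m + n * i)).toNat
  decreasing_by
    rename_i h
    have e : n * (i + 1) = n * i + n := by ring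
    rw [e]; omega

-- one histogram block of A: Lc is the list scanned/tested, Lv the list whose
-- elements are appended (the Python appends L1[j] in BOTH blocks); pyGetD is exact
-- here since Pre_ guarantees j < len Lv (len L2 ≤ len L1); Python raises otherwise.
-- lPrev models Python's variable l surviving from the first block into the second:
-- when the while loop runs 0 times (max = min) the stale l is read; the pair's
-- second component is the block's final l.  (For the FIRST block Python's l is
-- undefined when its loop runs 0 times — UnboundLocalError — excluded by Pre_.)
def histA (Lc Lv : List Int) (bi : Int) (lPrev : Int) : List Int × Int :=
  let M := (PySem.List.max? Lc (fun x => x)).getD 0  -- max(Lc); Pre_ excludes the empty list (ValueError)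
  let m := (PySem.List.min? Lc (fun x => x)).getD 0
  let n := bi
  let l0 := if m < M then compareWhile m M n 0 else lPrev   -- l after the while loop
  let l := if m + n * l0 = M then l0 + 1 else l0
  let s1 := (PySem.List.pyRange 0 l 1).foldl (fun s1 i =>
    s1 ++ [(PySem.List.pyRange 0 (PySem.List.len Lc) 1).foldl (fun acc j =>
      if m + n * i ≤ PySem.List.pyGetD Lc j 0 ∧ PySem.List.pyGetD Lc j 0 < m + n * (i + 1)
      then acc ++ [PySem.List.pyGetD Lv j 0] else acc) []]) []
  (s1.foldl (fun s2 r => s2 ++ [(r.length : Int)]) [], l)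

def compare_distr (L1 : List Int) (L2 : List Int) (bi : Int) : Bool :=
  let r1 := histA L1 L1 bi 0   -- the 0 is never read: Pre_ makes the first loop run
  let r2 := histA L2 L1 bi r1.2
  decide (r1.1 = r2.1)

-- ===== PORT B =====
-- counts(L) of Source B: c[(x-m)//bi] += 1 ported as a pointwise mapIdx update; exact
-- since on Pre_ the index is always inside [0, nb) (Python raises out of range).
def countsB (L : List Int) (bi : Int) : List Int :=
  let m := (PySem.List.min? L (fun x => x)).getD 0
  let nb := PySem.Int.floordiv ((PySem.List.max? L (fun x => x)).getD 0 - m) bi + 1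
  L.foldl (fun c x => c.mapIdx (fun j v =>
      if (j : Int) = PySem.Int.floordiv (x - m) bi then v + 1 else v))
    (List.replicate nb.toNat 0)

def compare_distr_alt (L1 : List Int) (L2 : List Int) (bi : Int) : Bool :=
  decide (countsB L1 bi = countsB L2 bi)

-- ===== PRECONDITION & SPEC =====
-- Exactly the inputs on which A returns: outside it A raises (an empty list:
-- ValueError on max(); all elements of L1 equal: UnboundLocalError on l;
-- len(L2)>len(L1): IndexError on L1[j]) or diverges (bi ≤ 0: the while loop never
-- ends).  A constant L2 stays INSIDE Pre_: there A silently reuses the stale l of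
-- the first block, and the equivalence is proved for that case too.
def Pre_compare_distr (L1 : List Int) (L2 : List Int) (bi : Int) : Prop :=
  1 ≤ bi ∧
  (PySem.List.min? L1 (fun x => x)).getD 0 < (PySem.List.max? L1 (fun x => x)).getD 0 ∧
  L2 ≠ [] ∧
  L2.length ≤ L1.length
instance (L1 : List Int) (L2 : List Int) (bi : Int) : Decidable (Pre_compare_distr L1 L2 bi) := by unfold Pre_compare_distr; infer_instance

def pvWitness_compare_distr : List Int × List Int × Int := ([0, 3, 1], [1, 2], 2)

def Spec_compare_distr (L1 : List Int) (L2 : List Int) (bi : Int) (out : Bool) : Prop := out = compare_distr_alt L1 L2 bi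
instance (L1 : List Int) (L2 : List Int) (bi : Int) (out : Bool) : Decidable (Spec_compare_distr L1 L2 bi out) := by unfold Spec_compare_distr; infer_instance

-- ===== CLAIM (what is proved, stated in full; the proofs are below) =====
def Claim_equal_compare_distr : Prop := ∀ (L1 : List Int) (L2 : List Int) (bi : Int), Dom_compare_distr L1 L2 bi → Pre_compare_distr L1 L2 bi → Spec_compare_distr L1 L2 bi (compare_distr L1 L2 bi)
-- ===== LEMMAS AND PROOFS =====

theorem compareWhile_spec (m M n i : Int) (hn : 1 ≤ n) (hi : m + n * i < M) :
    M ≤ m + n * compareWhile m M n i ∧ m + n * (compareWhile m M n i - 1) < M := by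
  rw [compareWhile, if_pos ⟨hi, hn⟩]
  by_cases h2 : m + n * (i + 1) < M
  · exact compareWhile_spec m M n (i + 1) hn h2
  · rw [compareWhile, if_neg (by tauto)]
    have e : n * (i + 1) = n * i + n := by ring
    have e2 : n * (i + 1 - 1) = n * i := by ring
    rw [e2]
    omega
  termination_by (M - (m + n * i)).toNat
  decreasing_by
    have e : n * (i + 1) = n * i + n := by ring
    rw [e]; omega

theorem bins_eq (m M n : Int) (hn : 1 ≤ n) (hlt : m < M) :
    (if m + n * compareWhile m M n 0 = M then compareWhile m M n 0 + 1 else compareWhile m M n 0)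
      = PySem.Int.floordiv (M - m) n + 1 := by
  obtain ⟨h1, h2⟩ := compareWhile_spec m M n 0 hn (by simpa using hlt)
  set r := compareWhile m M n 0 with hr
  have e1 : n * (r - 1) = n * r - n := by ring
  split_ifs with he
  · have : PySem.Int.floordiv (M - m) n = r := by
      rw [PySem.Int.floordiv_eq_iff_of_pos (by omega)]
      have e2 : r * n = n * r := by ring
      have e3 : (r + 1) * n = n * r + n := by ring
      omega
    omega
  · have : PySem.Int.floordiv (M - m) n = r - 1 := by
      rw [PySem.Int.floordiv_eq_iff_of_pos (by omega)]
      have e2 : (r - 1) * n = n * r - n := by ring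
      have e3 : (r - 1 + 1) * n = n * r := by ring
      omega
    omega

-- the bin test of A is the bin-index equation of B, for every x and every k
theorem bin_pred_eq (m n x : Int) (k : Int) (hn : 1 ≤ n) :
    (m + n * k ≤ x ∧ x < m + n * (k + 1)) ↔ k = PySem.Int.floordiv (x - m) n := by
  rw [eq_comm, PySem.Int.floordiv_eq_iff_of_pos (by omega)]
  have e2 : k * n = n * k := by ring
  have e3 : (k + 1) * n = n * k + n := by ring
  have e4 : n * (k + 1) = n * k + n := by ring
  omega

-- B's counting fold: length is preserved and entry j accumulates the count of
-- elements with bin index j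
theorem foldl_bump (g : Int → Int) (L : List Int) :
    ∀ (cs : List Int),
      (L.foldl (fun cs x => cs.mapIdx (fun j v =>
          if (j : Int) = g x then v + 1 else v)) cs).length = cs.length ∧
      ∀ (j : Nat), j < cs.length →
        (L.foldl (fun cs x => cs.mapIdx (fun j v =>
          if (j : Int) = g x then v + 1 else v)) cs).getD j 0 =
          cs.getD j 0 + (L.countP (fun x => decide ((j : Int) = g x)) : Int) := by
  induction L with
  | nil =>
    intro cs
    refine ⟨rfl, ?_⟩
    intro j hj
    simp
  | cons x t ih =>
    intro cs
    obtain ⟨ihlen, ihget⟩ := ih (cs.mapIdx (fun j v => if (j : Int) = g x then v + 1 else v))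
    refine ⟨by simpa using ihlen, ?_⟩
    intro j hj
    rw [List.foldl_cons, ihget j (by simpa using hj)]
    have hstep : (cs.mapIdx (fun j v => if (j : Int) = g x then v + 1 else v)).getD j 0 =
        if (j : Int) = g x then cs.getD j 0 + 1 else cs.getD j 0 := by
      rw [List.getD_eq_getElem?_getD, List.getD_eq_getElem?_getD, List.getElem?_mapIdx,
        List.getElem?_eq_getElem hj]
      simp
    rw [hstep, List.countP_cons]
    by_cases h : (j : Int) = g x
    · simp only [h, if_pos, decide_true]
      push_cast
      ring
    · simp [h]

-- generic facts about the extrema defaults used by both ports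
theorem min_le_max_getD (Lc : List Int) (hne : Lc ≠ []) :
    (PySem.List.min? Lc (fun x => x)).getD 0 ≤ (PySem.List.max? Lc (fun x => x)).getD 0 := by
  obtain ⟨x, hx⟩ : ∃ x, x ∈ Lc := by cases Lc with
    | nil => exact absurd rfl hne
    | cons y t => exact ⟨y, List.mem_cons_self⟩
  cases hmv : PySem.List.min? Lc (fun x => x) with
  | none => exact absurd ((PySem.List.min?_eq_none_iff _ _).mp hmv) hne
  | some mv =>
    cases hMv : PySem.List.max? Lc (fun x => x) with
    | none => exact absurd ((PySem.List.max?_eq_none_iff _ _).mp hMv) hne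
    | some Mv =>
      have h1 := PySem.List.min?_isMin hmv x hx
      have h2 := PySem.List.max?_isMax hMv x hx
      simp only [Option.getD_some]
      omega

theorem all_eq_of_min_eq_max (Lc : List Int) (hne : Lc ≠ [])
    (heq : (PySem.List.min? Lc (fun x => x)).getD 0 = (PySem.List.max? Lc (fun x => x)).getD 0) :
    ∀ x ∈ Lc, x = (PySem.List.min? Lc (fun x => x)).getD 0 := by
  intro x hx
  cases hmv : PySem.List.min? Lc (fun x => x) with
  | none => exact absurd ((PySem.List.min?_eq_none_iff _ _).mp hmv) hne
  | some mv =>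
    cases hMv : PySem.List.max? Lc (fun x => x) with
    | none => exact absurd ((PySem.List.max?_eq_none_iff _ _).mp hMv) hne
    | some Mv =>
      have h1 := PySem.List.min?_isMin hmv x hx
      have h2 := PySem.List.max?_isMax hMv x hx
      rw [hmv, hMv] at heq
      simp only [Option.getD_some] at heq ⊢
      omega

theorem countsB_length (Lc : List Int) (bi : Int) :
    (countsB Lc bi).length =
      (PySem.Int.floordiv ((PySem.List.max? Lc (fun x => x)).getD 0 -
        (PySem.List.min? Lc (fun x => x)).getD 0) bi + 1).toNat := by
  unfold countsB
  dsimp only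
  obtain ⟨blen, -⟩ := foldl_bump
    (fun x => PySem.Int.floordiv (x - (PySem.List.min? Lc (fun x => x)).getD 0) bi) Lc
    (List.replicate (PySem.Int.floordiv ((PySem.List.max? Lc (fun x => x)).getD 0 -
      (PySem.List.min? Lc (fun x => x)).getD 0) bi + 1).toNat 0)
  rw [blen, List.length_replicate]

-- one histogram block of A on a SPREAD list equals B's counts list, and its final
-- l is B's bin count (the appended values Lv are irrelevant: only row lengths are
-- collected)
theorem histA_eq_countsB (Lc Lv : List Int) (bi lp : Int) (hn : 1 ≤ bi)
    (hlt : (PySem.List.min? Lc (fun x => x)).getD 0 < (PySem.List.max? Lc (fun x => x)).getD 0) :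
    histA Lc Lv bi lp = (countsB Lc bi,
      PySem.Int.floordiv ((PySem.List.max? Lc (fun x => x)).getD 0 -
        (PySem.List.min? Lc (fun x => x)).getD 0) bi + 1) := by
  unfold histA countsB
  dsimp only
  set M := (PySem.List.max? Lc (fun x => x)).getD 0 with hM
  set m := (PySem.List.min? Lc (fun x => x)).getD 0 with hm
  have hfd : 0 ≤ PySem.Int.floordiv (M - m) bi := by
    rw [PySem.Int.floordiv_eq_ediv_of_pos (by omega)]
    exact Int.ediv_nonneg (by omega) (by omega)
  rw [if_pos hlt]
  rw [Prod.mk.injEq]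
  refine ⟨?_, bins_eq m M bi hn hlt⟩
  rw [PySem.List.foldl_append_singleton_eq_map, PySem.List.foldl_append_singleton_eq_map]
  simp only [List.nil_append, List.map_map]
  rw [bins_eq m M bi hn hlt]
  obtain ⟨blen, bget⟩ := foldl_bump (fun x => PySem.Int.floordiv (x - m) bi) Lc
    (List.replicate (PySem.Int.floordiv (M - m) bi + 1).toNat 0)
  apply List.ext_getElem
  · rw [List.length_map, PySem.List.length_pyRange_one, blen, List.length_replicate]
    omega
  · intro k h1 h2
    have hk : k < (List.replicate (PySem.Int.floordiv (M - m) bi + 1).toNat (0 : Int)).length := by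
      rw [blen, List.length_replicate] at h2
      rw [List.length_replicate]
      exact h2
    rw [List.getElem_map, PySem.List.getElem_pyRange_one,
      ← List.getD_eq_getElem _ 0 h2, bget k hk]
    have hrep : (List.replicate (PySem.Int.floordiv (M - m) bi + 1).toNat (0 : Int)).getD k 0 = 0 := by
      simp
    rw [hrep]
    simp only [Function.comp_apply]
    rw [PySem.List.foldl_append_ite
      (p := fun j => m + bi * (0 + (k : Int)) ≤ PySem.List.pyGetD Lc j 0 ∧
        PySem.List.pyGetD Lc j 0 < m + bi * (0 + (k : Int) + 1))
      (f := fun j => PySem.List.pyGetD Lv j 0)]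
    rw [List.nil_append, List.length_map, ← List.countP_eq_length_filter]
    have hmap : (PySem.List.pyRange 0 (PySem.List.len Lc) 1).map
        (fun j => PySem.List.pyGetD Lc j 0) = Lc := PySem.List.map_pyGetD_pyRange_zero Lc 0
    rw [show (fun j => decide (m + bi * (0 + (k : Int)) ≤ PySem.List.pyGetD Lc j 0 ∧
          PySem.List.pyGetD Lc j 0 < m + bi * (0 + (k : Int) + 1))) =
        ((fun x => decide (m + bi * (0 + (k : Int)) ≤ x ∧ x < m + bi * (0 + (k : Int) + 1))) ∘
          (fun j => PySem.List.pyGetD Lc j 0)) from rfl]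
    rw [← List.countP_map, hmap]
    have hcong : ∀ x ∈ Lc,
        (decide (m + bi * (0 + (k : Int)) ≤ x ∧ x < m + bi * (0 + (k : Int) + 1)) = true ↔
         decide (((k : Nat) : Int) = PySem.Int.floordiv (x - m) bi) = true) := by
      intro x _
      simp only [decide_eq_true_eq]
      simpa using bin_pred_eq m bi x (k : Int) hn
    rw [List.countP_congr hcong]
    omega

-- one histogram block of A on a CONSTANT list: the while loop runs 0 times, the
-- stale l = lp survives, and the rows are len(Lc) elements in bin 0 and 0 elsewhere
theorem histA_const (Lc Lv : List Int) (bi lp : Int) (hn : 1 ≤ bi) (hlp : 1 ≤ lp)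
    (hne : Lc ≠ [])
    (heq : (PySem.List.min? Lc (fun x => x)).getD 0 = (PySem.List.max? Lc (fun x => x)).getD 0) :
    histA Lc Lv bi lp = ((PySem.List.pyRange 0 lp 1).map
      (fun i => if i = 0 then (Lc.length : Int) else 0), lp) := by
  unfold histA
  dsimp only
  set M := (PySem.List.max? Lc (fun x => x)).getD 0 with hM
  set m := (PySem.List.min? Lc (fun x => x)).getD 0 with hm
  rw [if_neg (by omega : ¬ m < M)]
  have hpos : 0 < bi * lp := mul_pos (by omega) (by omega)
  rw [if_neg (by omega : ¬ m + bi * lp = M)]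
  rw [Prod.mk.injEq]
  refine ⟨?_, rfl⟩
  rw [PySem.List.foldl_append_singleton_eq_map, PySem.List.foldl_append_singleton_eq_map]
  simp only [List.nil_append, List.map_map]
  apply List.map_congr_left
  intro i hi
  rw [PySem.List.mem_pyRange_one] at hi
  simp only [Function.comp_apply]
  rw [PySem.List.foldl_append_ite
    (p := fun j => m + bi * i ≤ PySem.List.pyGetD Lc j 0 ∧
      PySem.List.pyGetD Lc j 0 < m + bi * (i + 1))
    (f := fun j => PySem.List.pyGetD Lv j 0)]
  rw [List.nil_append, List.length_map, ← List.countP_eq_length_filter]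
  have hmap : (PySem.List.pyRange 0 (PySem.List.len Lc) 1).map
      (fun j => PySem.List.pyGetD Lc j 0) = Lc := PySem.List.map_pyGetD_pyRange_zero Lc 0
  rw [show (fun j => decide (m + bi * i ≤ PySem.List.pyGetD Lc j 0 ∧
        PySem.List.pyGetD Lc j 0 < m + bi * (i + 1))) =
      ((fun x => decide (m + bi * i ≤ x ∧ x < m + bi * (i + 1))) ∘
        (fun j => PySem.List.pyGetD Lc j 0)) from rfl]
  rw [← List.countP_map, hmap]
  have hall := all_eq_of_min_eq_max Lc hne heq
  by_cases hi0 : i = 0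
  · subst hi0
    rw [if_pos rfl]
    have hcong : ∀ x ∈ Lc,
        (decide (m + bi * 0 ≤ x ∧ x < m + bi * (0 + 1)) = true ↔ (fun _ => true) x = true) := by
      intro x hx
      have hx' := hall x hx
      simp only [decide_eq_true_eq]
      constructor
      · intro _; trivial
      · intro _; omega
    rw [List.countP_congr hcong, List.countP_true]
  · rw [if_neg hi0]
    have hipos : 0 < bi * i := mul_pos (by omega) (by omega)
    have hcong : ∀ x ∈ Lc,
        (decide (m + bi * i ≤ x ∧ x < m + bi * (i + 1)) = true ↔ (fun _ => false) x = true) := by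
      intro x hx
      have hx' := hall x hx
      simp only [decide_eq_true_eq]
      constructor
      · intro hc; omega
      · intro hf; exact absurd hf (by simp)
    rw [List.countP_congr hcong, List.countP_false]
    rfl

-- B's counts of a constant list is the single bin [len(Lc)]
theorem countsB_const (Lc : List Int) (bi : Int) (hn : 1 ≤ bi) (hne : Lc ≠ [])
    (heq : (PySem.List.min? Lc (fun x => x)).getD 0 = (PySem.List.max? Lc (fun x => x)).getD 0) :
    countsB Lc bi = [(Lc.length : Int)] := by
  unfold countsB
  dsimp only
  set M := (PySem.List.max? Lc (fun x => x)).getD 0 with hM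
  set m := (PySem.List.min? Lc (fun x => x)).getD 0 with hm
  have h0 : PySem.Int.floordiv (M - m) bi = 0 := by
    rw [show M - m = 0 by omega, PySem.Int.floordiv_eq_ediv_of_pos (by omega)]
    exact Int.zero_ediv bi
  rw [h0]
  obtain ⟨blen, bget⟩ := foldl_bump (fun x => PySem.Int.floordiv (x - m) bi) Lc
    (List.replicate ((0 : Int) + 1).toNat 0)
  apply List.ext_getElem
  · rw [blen]
    simp
  · intro k h1 h2
    have hk0 : k = 0 := by
      simp only [List.length_cons, List.length_nil] at h2
      omega
    subst hk0
    rw [← List.getD_eq_getElem _ 0 h1, bget 0 (by simp)]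
    have hall := all_eq_of_min_eq_max Lc hne heq
    have hcong : ∀ x ∈ Lc,
        (decide (((0 : Nat) : Int) = PySem.Int.floordiv (x - m) bi) = true ↔
          (fun _ => true) x = true) := by
      intro x hx
      have hx' := hall x hx
      have hx0 : PySem.Int.floordiv (x - m) bi = 0 := by
        rw [show x - m = 0 by omega, PySem.Int.floordiv_eq_ediv_of_pos (by omega)]
        exact Int.zero_ediv bi
      simp [hx0]
    rw [List.countP_congr hcong, List.countP_true]
    simp

-- in B's counts of a spread list the LAST bin is nonempty (the maximum lands there)
theorem countsB_last_pos (Lc : List Int) (bi : Int) (hn : 1 ≤ bi)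
    (hlt : (PySem.List.min? Lc (fun x => x)).getD 0 < (PySem.List.max? Lc (fun x => x)).getD 0) :
    1 ≤ (countsB Lc bi).getD
      (PySem.Int.floordiv ((PySem.List.max? Lc (fun x => x)).getD 0 -
        (PySem.List.min? Lc (fun x => x)).getD 0) bi).toNat 0 := by
  unfold countsB
  dsimp only
  set M := (PySem.List.max? Lc (fun x => x)).getD 0 with hM
  set m := (PySem.List.min? Lc (fun x => x)).getD 0 with hm
  have hne : Lc ≠ [] := by
    intro h
    rw [h] at hM hm
    simp [PySem.List.max?, PySem.List.min?] at *
    omega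
  have hfd : 0 ≤ PySem.Int.floordiv (M - m) bi := by
    rw [PySem.Int.floordiv_eq_ediv_of_pos (by omega)]
    exact Int.ediv_nonneg (by omega) (by omega)
  obtain ⟨blen, bget⟩ := foldl_bump (fun x => PySem.Int.floordiv (x - m) bi) Lc
    (List.replicate (PySem.Int.floordiv (M - m) bi + 1).toNat 0)
  have ht : (PySem.Int.floordiv (M - m) bi).toNat <
      (List.replicate (PySem.Int.floordiv (M - m) bi + 1).toNat (0 : Int)).length := by
    rw [List.length_replicate]
    omega
  rw [bget _ ht]
  have hrep : (List.replicate (PySem.Int.floordiv (M - m) bi + 1).toNat (0 : Int)).getD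
      (PySem.Int.floordiv (M - m) bi).toNat 0 = 0 := by simp
  rw [hrep]
  have hMmem : M ∈ Lc := by
    cases hMv : PySem.List.max? Lc (fun x => x) with
    | none => exact absurd ((PySem.List.max?_eq_none_iff _ _).mp hMv) hne
    | some Mv =>
      have := PySem.List.max?_mem (key := fun x => x) hMv
      rw [hM, hMv]
      simpa using this
  have hcp : 0 < Lc.countP (fun x =>
      decide ((((PySem.Int.floordiv (M - m) bi).toNat : Nat) : Int) =
        PySem.Int.floordiv (x - m) bi)) := by
    rw [List.countP_pos_iff]
    refine ⟨M, hMmem, ?_⟩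
    simp only [decide_eq_true_eq]
    omega
  omega

theorem compare_distr_eq (L1 L2 : List Int) (bi : Int) (h : Pre_compare_distr L1 L2 bi) :
    compare_distr L1 L2 bi = compare_distr_alt L1 L2 bi := by
  obtain ⟨hn, h1, hne2, -⟩ := h
  unfold compare_distr compare_distr_alt
  dsimp only
  rw [histA_eq_countsB L1 L1 bi 0 hn h1]
  by_cases h2 : (PySem.List.min? L2 (fun x => x)).getD 0 < (PySem.List.max? L2 (fun x => x)).getD 0
  · rw [histA_eq_countsB L2 L1 bi _ hn h2]
  · have heq2 : (PySem.List.min? L2 (fun x => x)).getD 0 =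
        (PySem.List.max? L2 (fun x => x)).getD 0 := by
      have := min_le_max_getD L2 hne2
      omega
    have hfd1 : 0 ≤ PySem.Int.floordiv ((PySem.List.max? L1 (fun x => x)).getD 0 -
        (PySem.List.min? L1 (fun x => x)).getD 0) bi := by
      rw [PySem.Int.floordiv_eq_ediv_of_pos (by omega)]
      exact Int.ediv_nonneg (by omega) (by omega)
    rw [histA_const L2 L1 bi _ hn (by omega) hne2 heq2, countsB_const L2 bi hn hne2 heq2]
    dsimp only
    by_cases hfd0 : PySem.Int.floordiv ((PySem.List.max? L1 (fun x => x)).getD 0 -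
        (PySem.List.min? L1 (fun x => x)).getD 0) bi = 0
    · rw [hfd0]
      have hr : PySem.List.pyRange 0 ((0 : Int) + 1) 1 = [0] := by decide
      rw [hr]
      simp
    · -- last bin of countsB L1 is nonempty but the stale-l histogram of L2 has a 0
      -- there, and the lengths 1 vs fd+1 differ: both comparisons are False
      have hlast := countsB_last_pos L1 bi hn h1
      have hlenc := countsB_length L1 bi
      rw [decide_eq_false, decide_eq_false]
      · intro hEq
        have := congrArg List.length hEq
        rw [hlenc, List.length_cons, List.length_nil] at this
        omega
      · intro hEq
        have hgd := congrArg (fun l => l.getD (PySem.Int.floordiv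
          ((PySem.List.max? L1 (fun x => x)).getD 0 -
            (PySem.List.min? L1 (fun x => x)).getD 0) bi).toNat 0) hEq
        simp only at hgd
        have htlen : (PySem.Int.floordiv ((PySem.List.max? L1 (fun x => x)).getD 0 -
            (PySem.List.min? L1 (fun x => x)).getD 0) bi).toNat <
            ((PySem.List.pyRange 0 (PySem.Int.floordiv ((PySem.List.max? L1 (fun x => x)).getD 0 -
              (PySem.List.min? L1 (fun x => x)).getD 0) bi + 1) 1).map
              (fun i => if i = 0 then (L2.length : Int) else 0)).length := by
          rw [List.length_map, PySem.List.length_pyRange_one]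
          omega
        rw [List.getD_eq_getElem _ 0 htlen, List.getElem_map, PySem.List.getElem_pyRange_one] at hgd
        rw [if_neg (by omega)] at hgd
        omega

-- ===== VERDICT (by name: the statement is the Claim_ definition above) =====
theorem compare_distr_spec : Claim_equal_compare_distr := by
  intro L1 L2 bi _ hpre
  unfold Spec_compare_distr
  exact compare_distr_eq L1 L2 bi hpre
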